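-- pv_equiv track=rewrite | github.com/Mayura01/seq-seq-LSTM | model_evolution/level3.py | tokenize_texts
-- ===== SOURCE A (Python) =====
-- def tokenize_texts(texts):
--     word_to_index = {}
--     index = 1
--     for text in texts:
--         for word in text.split():
--             if word.lower() not in word_to_index:
--                 word_to_index[word.lower()] = index
--                 index += 1
--     return word_to_index
-- ===== SOURCE B (Python) =====
-- def tokenize_texts(texts):
--     words = [w.lower() for t in texts for w in t.split()]
--     first = {}
--     for i in range(len(words) - 1, -1, -1):
--         first[words[i]] = i
--     order = sorted(first, key=first.get)
--     return dict(zip(order, range(1, len(order) + 1)))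
-- ===== Notes on version B (the rewrite author's own statement) =====
-- stated objective: alternative
-- what changed: Instead of one fused pass with an inline membership test and a manually maintained running counter, B makes a reverse index pass that overwrites first[word]=i so each word ends up mapped to its first-occurrence position, then SORTS the keys by that position and zips the sorted order with range(1, n+1); correctness rests on sorting distinct words by first occurrence reproducing exactly the first-seen order.
import Mathlib
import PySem

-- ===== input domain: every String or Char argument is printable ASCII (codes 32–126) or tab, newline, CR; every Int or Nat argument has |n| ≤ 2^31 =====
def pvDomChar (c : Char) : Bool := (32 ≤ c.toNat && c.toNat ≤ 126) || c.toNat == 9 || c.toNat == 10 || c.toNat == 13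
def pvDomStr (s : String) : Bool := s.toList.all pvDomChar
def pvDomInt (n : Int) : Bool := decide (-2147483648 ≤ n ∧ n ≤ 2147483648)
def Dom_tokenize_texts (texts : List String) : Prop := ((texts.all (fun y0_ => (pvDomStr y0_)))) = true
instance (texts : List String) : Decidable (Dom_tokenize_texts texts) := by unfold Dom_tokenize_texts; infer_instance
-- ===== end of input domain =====

-- B replaces A's fused loop (inline membership test + running counter) by a sort:
-- a reverse index loop overwrites first[word] down to its first-occurrence position,
-- the keys are sorted by that position, and zipped with range(1, n+1) (alternative).

-- ===== PORT A =====
-- one iteration of A's inner loop over the words of a text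
def tokStep (st : PySem.Dict String Int × Int) (word : String) : PySem.Dict String Int × Int :=
  if st.1.contains (PySem.Str.lower word) then st
  else (st.1.insert (PySem.Str.lower word) st.2, st.2 + 1)

def tokenize_texts (texts : List String) : List (String × Int) :=
  (texts.foldl (fun st text => (PySem.Str.split₀ text).foldl tokStep st)
    (PySem.Dict.empty, 1)).1.items

-- ===== PORT B =====
def tokenize_texts_alt (texts : List String) : List (String × Int) :=
  let words := texts.flatMap (fun t => (PySem.Str.split₀ t).map PySem.Str.lower)
  let first := (PySem.List.pyRange ((words.length : Int) - 1) (-1) (-1)).foldl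
      (fun d i => d.insert (PySem.List.pyGetD words i "") i)
      (PySem.Dict.empty : PySem.Dict String Int)
  -- key=first.get: every key of `first` is present, so Python's .get returns its int
  let order := PySem.List.sorted first.keys (fun w => first.getD w 0) false
  List.zip order (PySem.List.pyRange 1 ((order.length : Int) + 1) 1)

-- ===== PRECONDITION & SPEC =====
def Spec_tokenize_texts (texts : List String) (out : List (String × Int)) : Prop := out = tokenize_texts_alt texts
instance (texts : List String) (out : List (String × Int)) : Decidable (Spec_tokenize_texts texts out) := by unfold Spec_tokenize_texts; infer_instance

-- ===== CLAIM (what is proved, stated in full; the proofs are below) =====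
def Claim_equal_tokenize_texts : Prop := ∀ (texts : List String), Dom_tokenize_texts texts → Spec_tokenize_texts texts (tokenize_texts texts)

-- ===== LEMMAS AND PROOFS =====

-- A's loop body on already-lowercased words
def tokStep' (st : PySem.Dict String Int × Int) (w : String) : PySem.Dict String Int × Int :=
  if st.1.contains w then st else (st.1.insert w st.2, st.2 + 1)

theorem ofList_filter {α : Type} [BEq α] [LawfulBEq α] (p : α → Bool) (l : List α) :
    PySem.Set.ofList (l.filter p) = (PySem.Set.ofList l).filter p := by
  induction l with
  | nil => simp [PySem.Set.ofList]
  | cons x l ih =>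
    rw [PySem.Set.ofList_cons]
    by_cases hx : p x = true
    · rw [List.filter_cons_of_pos hx, PySem.Set.ofList_cons, ih, List.filter_cons_of_pos hx]
      simp only [PySem.Set.discard, List.filter_filter]
      congr 1
      apply List.filter_congr
      intro y _
      exact Bool.and_comm _ _
    · rw [List.filter_cons_of_neg hx, ih, List.filter_cons_of_neg hx]
      simp only [PySem.Set.discard, List.filter_filter]
      apply List.filter_congr
      intro y _
      by_cases hy : y = x
      · subst hy; simp [hx]
      · simp [hy]

theorem enum_shift {α : Type} (l : List α) (s : Int) :
    (PySem.List.enumerate l (s + 1)).map (fun p => (p.2, p.1)) =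
      (PySem.List.enumerate l s).map (fun p => (p.2, p.1 + 1)) := by
  induction l generalizing s with
  | nil => simp [PySem.List.enumerate]
  | cons x l ih => rw [PySem.List.enumerate_cons, PySem.List.enumerate_cons, List.map_cons,
      List.map_cons, ih]

theorem tok_loop (ws : List String) (d : PySem.Dict String Int) :
    (ws.foldl tokStep' (d, (d.size : Int) + 1)).1.items
      = d.items ++ (PySem.List.enumerate
          (PySem.Set.ofList (ws.filter (fun w => !(d.contains w)))) ((d.size : Int) + 1)).map
          (fun p => (p.2, p.1)) := by
  induction ws generalizing d with
  | nil => simp [PySem.Set.ofList]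
  | cons w ws ih =>
    rw [List.foldl_cons]
    by_cases hc : d.contains w = true
    · rw [show tokStep' (d, (d.size : Int) + 1) w = (d, (d.size : Int) + 1) by
        simp [tokStep', hc]]
      rw [ih d, List.filter_cons_of_neg (by simp [hc])]
    · have hcf : d.contains w = false := by simpa using hc
      rw [show tokStep' (d, (d.size : Int) + 1) w
            = (d.insert w ((d.size : Int) + 1), (d.size : Int) + 2) by
        simp [tokStep', hcf]; ring]
      have hsz : ((d.insert w ((d.size : Int) + 1)).size : Int) + 1 = (d.size : Int) + 2 := by
        rw [PySem.Dict.size_insert]; simp [hcf]; ring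
      rw [← hsz, ih]
      rw [PySem.Dict.items_insert_of_not_contains _ _ hcf]
      rw [List.filter_cons_of_pos (by simp [hcf]), PySem.Set.ofList_cons,
        PySem.List.enumerate_cons, List.map_cons, hsz]
      have hfilt : ws.filter (fun x => !((d.insert w ((d.size : Int) + 1)).contains x))
          = (ws.filter (fun x => !(d.contains x))).filter (fun x => !(x == w)) := by
        rw [List.filter_filter]
        apply List.filter_congr
        intro y _
        rw [PySem.Dict.contains_insert]
        cases h1 : (y == w) <;> cases h2 : d.contains y <;> rfl
      rw [hfilt, ofList_filter]
      simp only [PySem.Set.discard, List.append_assoc]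
      ring_nf
      simp

-- A equals the canonical "enumerate the first-seen-ordered distinct words from 1" form
theorem A_eq_canonical (texts : List String) :
    tokenize_texts texts
      = (PySem.List.enumerate
          (PySem.Set.ofList (texts.flatMap (fun t => (PySem.Str.split₀ t).map PySem.Str.lower))) 0).map
          (fun p => (p.2, p.1 + 1)) := by
  unfold tokenize_texts
  have h1 : (texts.foldl (fun st text => (PySem.Str.split₀ text).foldl tokStep st)
        (PySem.Dict.empty, 1))
      = ((texts.flatMap (fun t => (PySem.Str.split₀ t).map PySem.Str.lower)).foldl tokStep'
        (PySem.Dict.empty, 1)) := by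
    rw [List.foldl_flatMap]
    congr 1
    funext st t
    rw [List.foldl_map]
    rfl
  rw [h1]
  have h0 : ((PySem.Dict.empty : PySem.Dict String Int).size : Int) + 1 = 1 := by
    simp [PySem.Dict.empty, PySem.Dict.size]
  rw [show ((PySem.Dict.empty : PySem.Dict String Int), (1 : Int))
        = ((PySem.Dict.empty : PySem.Dict String Int),
           ((PySem.Dict.empty : PySem.Dict String Int).size : Int) + 1) by rw [h0]]
  rw [tok_loop, h0]
  have hfilt : (texts.flatMap (fun t => (PySem.Str.split₀ t).map PySem.Str.lower)).filter
      (fun w => !((PySem.Dict.empty : PySem.Dict String Int).contains w))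
      = texts.flatMap (fun t => (PySem.Str.split₀ t).map PySem.Str.lower) := by
    apply List.filter_eq_self.mpr
    intro a _
    simp [PySem.Dict.contains_empty]
  rw [hfilt]
  simp only [PySem.Dict.empty]
  rw [show (1 : Int) = 0 + 1 by ring, enum_shift]
  simp

-- first-occurrence positions are strictly increasing along the first-seen distinct order
theorem pairwise_idx {α : Type} [DecidableEq α] (xs : List α) :
    (PySem.Set.ofList xs).Pairwise
      (fun a b => ((PySem.List.index? xs a).getD 0 : Nat) < (PySem.List.index? xs b).getD 0) := by
  induction xs with
  | nil => simp [PySem.Set.ofList]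
  | cons x l ih =>
    rw [PySem.Set.ofList_cons]
    constructor
    · intro b hb
      have hbx : b ≠ x := by
        simp only [PySem.Set.discard, List.mem_filter] at hb
        simpa using hb.2
      have hbm : b ∈ l := by
        have : b ∈ PySem.Set.ofList l := by
          simp only [PySem.Set.discard, List.mem_filter] at hb
          exact hb.1
        simpa [PySem.Set.mem_ofList] using this
      rw [PySem.List.index?_cons_self, PySem.List.index?_cons_of_ne l (Ne.symm hbx)]
      have : (PySem.List.index? l b).isSome := (PySem.List.index?_isSome_iff _ _).mpr hbm
      cases h : PySem.List.index? l b with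
      | none => rw [h] at this; simp at this
      | some k => simp
    · have := List.Pairwise.filter (p := fun y => !(y == x)) ih
      refine this.imp_of_mem ?_
      intro a b ha hb hab
      have hax : a ≠ x := by simpa using (List.mem_filter.mp ha).2
      have hbx : b ≠ x := by simpa using (List.mem_filter.mp hb).2
      rw [PySem.List.index?_cons_of_ne l (Ne.symm hax),
        PySem.List.index?_cons_of_ne l (Ne.symm hbx)]
      have ham : a ∈ l := by
        simpa [PySem.Set.mem_ofList] using (List.mem_filter.mp ha).1
      have hbm : b ∈ l := by
        simpa [PySem.Set.mem_ofList] using (List.mem_filter.mp hb).1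
      cases h1 : PySem.List.index? l a with
      | none => exact absurd ((PySem.List.index?_eq_none_iff _ _).mp h1) (by simpa using ham)
      | some k1 =>
        cases h2 : PySem.List.index? l b with
        | none => exact absurd ((PySem.List.index?_eq_none_iff _ _).mp h2) (by simpa using hbm)
        | some k2 =>
          rw [h1, h2] at hab
          simp at hab ⊢
          omega

-- zip with range(s, s+len) is enumerate-and-swap
theorem zip_range {α : Type} (l : List α) (s : Int) :
    List.zip l (PySem.List.pyRange s (s + l.length) 1)
      = (PySem.List.enumerate l s).map (fun p => (p.2, p.1)) := by
  induction l generalizing s with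
  | nil => simp [PySem.List.enumerate]
  | cons x l ih =>
    rw [PySem.List.pyRange_one_cons (by rw [List.length_cons]; push_cast; omega), PySem.List.enumerate_cons, List.map_cons]
    have : s + (↑(x :: l).length : Int) = (s + 1) + l.length := by simp; omega
    rw [List.zip_cons_cons, this, ih]

-- structural form of B's reverse overwrite loop
def buildFirst (ws : List String) (s : Int) : PySem.Dict String Int :=
  match ws with
  | [] => PySem.Dict.empty
  | x :: ws => (buildFirst ws (s + 1)).insert x s

theorem foldr_enum_eq_buildFirst (ws : List String) (s : Int) :
    (PySem.List.enumerate ws s).foldr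
        (fun p (d : PySem.Dict String Int) => d.insert p.2 p.1) PySem.Dict.empty
      = buildFirst ws s := by
  induction ws generalizing s with
  | nil => rfl
  | cons x ws ih => rw [PySem.List.enumerate_cons, List.foldr_cons, ih, buildFirst]

theorem get?_buildFirst (ws : List String) (s : Int) (w : String) :
    (buildFirst ws s).get? w = (PySem.List.index? ws w).map (fun k => s + (k : Int)) := by
  induction ws generalizing s with
  | nil => simp [buildFirst, PySem.Dict.get?_empty, PySem.List.index?]
  | cons x ws ih =>
    by_cases hw : w = x
    · subst hw
      rw [buildFirst, PySem.Dict.get?_insert_self, PySem.List.index?_cons_self]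
      simp
    · rw [buildFirst, PySem.Dict.get?_insert_of_ne _ _ hw, ih,
        PySem.List.index?_cons_of_ne ws (Ne.symm hw)]
      cases PySem.List.index? ws w
      · simp
      · simp
        ring

theorem nodup_keys_buildFirst (ws : List String) (s : Int) :
    (buildFirst ws s).keys.Nodup := by
  induction ws generalizing s with
  | nil => simp [buildFirst, PySem.Dict.keys_empty]
  | cons x ws ih => exact PySem.Dict.nodup_keys_insert _ _ _ (ih (s + 1))

theorem mem_keys_buildFirst (ws : List String) (s : Int) (w : String) :
    w ∈ (buildFirst ws s).keys ↔ w ∈ ws := by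
  induction ws generalizing s with
  | nil => simp [buildFirst, PySem.Dict.keys_empty]
  | cons x ws ih =>
    rw [buildFirst, PySem.Dict.mem_keys_insert, ih]
    simp

theorem B_eq_canonical (texts : List String) :
    tokenize_texts_alt texts
      = (PySem.List.enumerate
          (PySem.Set.ofList (texts.flatMap (fun t => (PySem.Str.split₀ t).map PySem.Str.lower))) 0).map
          (fun p => (p.2, p.1 + 1)) := by
  unfold tokenize_texts_alt
  set words := texts.flatMap (fun t => (PySem.Str.split₀ t).map PySem.Str.lower) with hw
  -- the reverse index loop builds buildFirst words 0
  have hrange : PySem.List.pyRange ((words.length : Int) - 1) (-1) (-1)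
      = ((PySem.List.enumerate words 0).map (fun p => p.1)).reverse := by
    rw [PySem.List.pyRange_neg_one_eq_reverse, PySem.List.map_fst_enumerate]
    norm_num
  have hfirst : (PySem.List.pyRange ((words.length : Int) - 1) (-1) (-1)).foldl
        (fun d i => d.insert (PySem.List.pyGetD words i "") i)
        (PySem.Dict.empty : PySem.Dict String Int)
      = buildFirst words 0 := by
    rw [hrange, ← List.map_reverse, List.foldl_map]
    rw [PySem.List.foldl_congr_mem _ _
      (fun (d : PySem.Dict String Int) (p : Int × String) => d.insert p.2 p.1) _ ?_]
    · rw [List.foldl_reverse, foldr_enum_eq_buildFirst]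
    · intro acc p hp
      rw [List.mem_reverse, PySem.List.mem_enumerate_iff] at hp
      obtain ⟨k, hk, rfl⟩ := hp
      simp only [zero_add]
      rw [PySem.List.pyGetD_natCast, List.getD_eq_getElem _ _ hk]
  simp only [hfirst]
  -- sorting the keys by stored first position restores first-seen order
  have hmem : ∀ w, w ∈ (buildFirst words 0).keys ↔ w ∈ PySem.Set.ofList words := by
    intro w
    rw [mem_keys_buildFirst, PySem.Set.mem_ofList]
  have hperm : (PySem.Set.ofList words).Perm (buildFirst words 0).keys :=
    (List.perm_ext_iff_of_nodup (PySem.Set.nodup_ofList words)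
      (nodup_keys_buildFirst words 0)).mpr (fun a => (hmem a).symm)
  have hpair : (PySem.Set.ofList words).Pairwise
      (fun a b => (buildFirst words 0).getD a 0 < (buildFirst words 0).getD b 0) := by
    refine (pairwise_idx words).imp_of_mem ?_
    intro a b ha hb hab
    have ham : a ∈ words := by simpa [PySem.Set.mem_ofList] using ha
    have hbm : b ∈ words := by simpa [PySem.Set.mem_ofList] using hb
    obtain ⟨ka, hka⟩ := Option.isSome_iff_exists.mp
      ((PySem.List.index?_isSome_iff words a).mpr ham)
    obtain ⟨kb, hkb⟩ := Option.isSome_iff_exists.mp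
      ((PySem.List.index?_isSome_iff words b).mpr hbm)
    rw [PySem.Dict.getD_eq_get?_getD, PySem.Dict.getD_eq_get?_getD,
      get?_buildFirst, get?_buildFirst, hka, hkb]
    rw [hka, hkb] at hab
    simp at hab ⊢
    omega
  have hsort : PySem.List.sorted (buildFirst words 0).keys
      (fun w => (buildFirst words 0).getD w 0) false = PySem.Set.ofList words :=
    PySem.List.sorted_eq_of_perm_of_pairwise_lt _ _ _ hperm hpair
  simp only [hsort]
  rw [show ((PySem.Set.ofList words).length : Int) + 1 = 1 + ((PySem.Set.ofList words).length : Int)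
      by ring]
  rw [zip_range, show (1 : Int) = 0 + 1 by ring, enum_shift]
  norm_num

-- ===== VERDICT (by name: the statement is the Claim_ definition above) =====
theorem tokenize_texts_spec : Claim_equal_tokenize_texts := by
  intro texts _
  unfold Spec_tokenize_texts
  rw [A_eq_canonical, B_eq_canonical]
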